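-- pv_equiv track=rewrite | github.com/SSRQ-SDS-FDS/pyucollate | pyucollate/collator.py | sort_key_from_collation_elements
-- ===== SOURCE A (Python) =====
-- def sort_key_from_collation_elements(collation_elements: list[list[int]]) -> tuple[int, ...]:
--     """Convert a list of collation elements to a sort key.
--
--     Args:
--     ----
--         collation_elements (list[list[int]]): The collation elements to convert.
--
--     Returns:
--     -------
--         tuple[int, ...]: The sort key.
--     """
--     sort_key = [
--         ce_l
--         for level in range(4)
--         for element in collation_elements
--         if len(element) > level
--         for ce_l in [0, element[level]]
--         if ce_l
--     ]
--
--     return tuple(sort_key)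
-- ===== SOURCE B (Python) =====
-- def sort_key_from_collation_elements(collation_elements):
--     """One pass over the elements, building one bucket per level, then
--     concatenating the buckets level-major."""
--     buckets = ([], [], [], [])
--     for element in collation_elements:
--         for level in range(min(4, len(element))):
--             v = element[level]
--             if v:
--                 buckets[level].append(v)
--     return tuple(buckets[0] + buckets[1] + buckets[2] + buckets[3])
-- ===== Notes on version B (the rewrite author's own statement) =====
-- stated objective: alternative
-- what changed: Replaces A's four level-major scans of the whole list (one per level, expressed as a nested comprehension) with a single pass that distributes each element's nonzero weights into four per-level buckets and concatenates them.
import Mathlib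
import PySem

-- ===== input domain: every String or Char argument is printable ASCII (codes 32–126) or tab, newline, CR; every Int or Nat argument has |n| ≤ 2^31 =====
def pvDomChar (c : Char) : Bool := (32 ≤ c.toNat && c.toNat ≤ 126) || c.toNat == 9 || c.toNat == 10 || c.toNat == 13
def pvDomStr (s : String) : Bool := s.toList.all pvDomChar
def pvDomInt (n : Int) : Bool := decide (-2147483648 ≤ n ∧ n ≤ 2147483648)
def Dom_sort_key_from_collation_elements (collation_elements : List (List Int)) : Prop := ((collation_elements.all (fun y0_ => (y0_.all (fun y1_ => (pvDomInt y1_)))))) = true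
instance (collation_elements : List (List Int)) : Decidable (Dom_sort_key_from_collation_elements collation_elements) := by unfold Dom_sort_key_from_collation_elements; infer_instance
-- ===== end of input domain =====

-- ===== PORT A =====
-- B: one pass with four per-level buckets, concatenated afterwards (alternative decomposition of the same O(n) work; return-value equivalence).

-- ===== PORT A =====
-- Literal port of A's nested comprehension: level-major over range(4), then over the
-- elements; the guard len(element) > level makes the pyGet? in range, so getD 0 is exact.
def sort_key_from_collation_elements (collation_elements : List (List Int)) : List Int :=
  (PySem.List.pyRange 0 4 1).flatMap (fun level =>
    collation_elements.flatMap (fun element =>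
      if (element.length : Int) > level then
        ([0, (PySem.List.pyGet? element level).getD 0].filter (fun ce_l => ce_l ≠ 0))
      else []))

-- ===== PORT B =====
-- B-side inner loop body: place v into bucket `level` if nonzero.
def pvPlace (b : List Int × List Int × List Int × List Int) (level : Nat) (v : Int) :
    List Int × List Int × List Int × List Int :=
  if v ≠ 0 then
    match level with
    | 0 => (b.1 ++ [v], b.2.1, b.2.2.1, b.2.2.2)
    | 1 => (b.1, b.2.1 ++ [v], b.2.2.1, b.2.2.2)
    | 2 => (b.1, b.2.1, b.2.2.1 ++ [v], b.2.2.2)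
    | _ => (b.1, b.2.1, b.2.2.1, b.2.2.2 ++ [v])
  else b

def sort_key_from_collation_elements_alt (collation_elements : List (List Int)) : List Int :=
  let buckets :=
    collation_elements.foldl
      (fun b element =>
        (List.range (min 4 element.length)).foldl
          (fun b level => pvPlace b level (element.getD level 0)) b)
      ([], [], [], [])
  buckets.1 ++ buckets.2.1 ++ buckets.2.2.1 ++ buckets.2.2.2

-- ===== PRECONDITION & SPEC =====
def Spec_sort_key_from_collation_elements (collation_elements : List (List Int)) (out : List Int) : Prop :=
  out = sort_key_from_collation_elements_alt collation_elements
instance (collation_elements : List (List Int)) (out : List Int) :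
    Decidable (Spec_sort_key_from_collation_elements collation_elements out) := by
  unfold Spec_sort_key_from_collation_elements; infer_instance

-- ===== CLAIM =====
def Claim_equal_sort_key_from_collation_elements : Prop :=
  ∀ (collation_elements : List (List Int)),
    Dom_sort_key_from_collation_elements collation_elements →
    Spec_sort_key_from_collation_elements collation_elements
      (sort_key_from_collation_elements collation_elements)

-- ===== LEMMAS AND PROOFS =====
-- g i e : the nonzero weight of element e at level i (as a 0- or 1-element list).
def pvG (i : Nat) (e : List Int) : List Int :=
  if i < e.length ∧ e.getD i 0 ≠ 0 then [e.getD i 0] else []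

-- Inner loop of B on one element, from an arbitrary bucket state.
theorem pvInner (e : List Int) (b : List Int × List Int × List Int × List Int) :
    (List.range (min 4 e.length)).foldl
      (fun b level => pvPlace b level (e.getD level 0)) b
    = (b.1 ++ pvG 0 e, b.2.1 ++ pvG 1 e, b.2.2.1 ++ pvG 2 e, b.2.2.2 ++ pvG 3 e) := by
  obtain ⟨b0, b1, b2, b3⟩ := b
  match e with
  | [] => simp [pvG]
  | [a] =>
      norm_num [List.range_succ, pvG, pvPlace]
      all_goals (split_ifs <;> simp_all)
  | [a, c] =>
      norm_num [List.range_succ, pvG, pvPlace]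
      all_goals (split_ifs <;> simp_all)
  | [a, c, d] =>
      norm_num [List.range_succ, pvG, pvPlace]
      all_goals (split_ifs <;> simp_all)
  | a :: c :: d :: f :: rest =>
      have hmin : min 4 (a :: c :: d :: f :: rest).length = 4 := by simp
      rw [hmin]
      norm_num [List.range_succ, pvG, pvPlace]
      all_goals (split_ifs <;> simp_all)

theorem pvFoldB (ces : List (List Int)) (b : List Int × List Int × List Int × List Int) :
    ces.foldl
      (fun b e =>
        (List.range (min 4 e.length)).foldl
          (fun b level => pvPlace b level (e.getD level 0)) b) b
    = (b.1 ++ ces.flatMap (pvG 0), b.2.1 ++ ces.flatMap (pvG 1),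
       b.2.2.1 ++ ces.flatMap (pvG 2), b.2.2.2 ++ ces.flatMap (pvG 3)) := by
  induction ces generalizing b with
  | nil => simp
  | cons e t ih =>
      rw [List.foldl_cons, pvInner, ih]
      simp [List.flatMap_cons, List.append_assoc]

theorem pvLevelA (ces : List (List Int)) (i : Nat) :
    (ces.flatMap (fun element =>
      if (element.length : Int) > (i : Int) then
        ([0, (PySem.List.pyGet? element (i : Int)).getD 0].filter (fun ce_l => ce_l ≠ 0))
      else []))
    = ces.flatMap (pvG i) := by
  apply List.flatMap_congr
  intro e _
  have hx : (PySem.List.pyGet? e ((i : Nat) : Int)).getD 0 = e.getD i 0 := by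
    simp [List.getD]
  by_cases h : i < e.length
  · have hgt : ((i : Int) < (e.length : Int)) := by exact_mod_cast h
    simp [pvG, h, hgt]
    split_ifs <;> simp_all
  · have hgt : ¬ ((i : Int) < (e.length : Int)) := by exact_mod_cast h
    simp [pvG, h, hgt]

theorem sort_key_spec_core (ces : List (List Int)) :
    sort_key_from_collation_elements ces = sort_key_from_collation_elements_alt ces := by
  have hr : PySem.List.pyRange 0 4 1 = [0, 1, 2, 3] := by decide
  have h0 := pvLevelA ces 0
  have h1 := pvLevelA ces 1
  have h2 := pvLevelA ces 2
  have h3 := pvLevelA ces 3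
  push_cast at h0 h1 h2 h3
  unfold sort_key_from_collation_elements sort_key_from_collation_elements_alt
  rw [hr, pvFoldB]
  simp only [List.flatMap_cons, List.flatMap_nil, List.append_nil, List.nil_append]
  rw [h0, h1, h2, h3]
  simp [List.append_assoc]

-- ===== VERDICT =====
theorem sort_key_from_collation_elements_spec : Claim_equal_sort_key_from_collation_elements := by
  intro ces _
  exact sort_key_spec_core ces
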